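-- pv_equiv track=rewrite | github.com/cgvvxx/PS | ps/DFS, BFS/229_B_9079.py | change_dig
-- ===== SOURCE A (Python) =====
-- def change_dig(maps, n): # 0 ; 우하향, 1 ; 우상향
--
--     n_maps = [[-1]*3 for _ in range(3)]
--
--     if n == 0:
--         for i in range(3):
--             for j in range(3):
--                 if i == j:
--                     n_maps[i][j] = 1 - maps[i][j]
--                 else:
--                     n_maps[i][j] = maps[i][j]
--     else:
--         for i in range(3):
--             for j in range(3):
--                 if i == 2-j:
--                     n_maps[i][j] = 1 - maps[i][j]
--                 else:
--                     n_maps[i][j] = maps[i][j]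
--
--     return n_maps
-- ===== SOURCE B (Python) =====
-- def change_dig(maps, n):
--     # Reduce the anti-diagonal case to the main-diagonal case: reversing the row
--     # order turns the anti-diagonal into the main diagonal, so we always flip
--     # the main diagonal of the (possibly reversed) grid and reverse back.
--     g = [maps[i][:3] for i in range(3)]
--     if n != 0:
--         g.reverse()
--     out = [row[:i] + [1 - row[i]] + row[i + 1:] for i, row in enumerate(g)]
--     if n != 0:
--         out.reverse()
--     return out
-- ===== Notes on version B (the rewrite author's own statement) =====
-- stated objective: alternative
-- what changed: B reduces the anti-diagonal case to the main-diagonal case by reversing the row order, then always flips the main diagonal by rebuilding each row as row[:i]+[1-row[i]]+row[i+1:], and reverses back; A instead rebuilds the grid cell-by-cell with nested loops and an on/off-diagonal branch per cell in two separate code paths.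
import Mathlib
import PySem

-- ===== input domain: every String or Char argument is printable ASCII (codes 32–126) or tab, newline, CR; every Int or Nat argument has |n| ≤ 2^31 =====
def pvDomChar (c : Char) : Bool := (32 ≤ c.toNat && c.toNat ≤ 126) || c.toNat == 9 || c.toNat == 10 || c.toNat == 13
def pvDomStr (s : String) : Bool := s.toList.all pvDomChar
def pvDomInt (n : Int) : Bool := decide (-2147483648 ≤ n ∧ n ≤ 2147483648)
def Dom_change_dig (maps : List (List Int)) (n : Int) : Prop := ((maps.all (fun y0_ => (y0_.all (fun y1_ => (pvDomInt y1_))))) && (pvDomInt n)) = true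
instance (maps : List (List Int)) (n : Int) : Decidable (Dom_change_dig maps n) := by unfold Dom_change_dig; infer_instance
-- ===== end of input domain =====

-- B reduces the anti-diagonal case to the main-diagonal case by reversing row order,
-- flips the main diagonal by rebuilding each row, and reverses back; same values as A.

-- ===== PORT A =====
-- maps[i][j]: exact under Pre_ (0 ≤ i,j < 3 and the grid has a full 3x3 prefix, so pyGet? is some)
def pyGet2 (maps : List (List Int)) (i j : Int) : Int :=
  ((((PySem.List.pyGet? maps i).getD []) |> (fun r => PySem.List.pyGet? r j))).getD 0

-- n_maps[i][j] = v for the in-range nonnegative loop indices i, j ∈ {0,1,2}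
def pySet2 (m : List (List Int)) (i j : Nat) (v : Int) : List (List Int) :=
  m.set i ((m.getD i []).set j v)

def change_dig (maps : List (List Int)) (n : Int) : List (List Int) :=
  let n_maps := (List.range 3).map (fun _ => [(-1 : Int), -1, -1])  -- [[-1]*3 for _ in range(3)]
  if n = 0 then
    (PySem.List.pyRange 0 3 1).foldl (fun acc i =>
      (PySem.List.pyRange 0 3 1).foldl (fun acc j =>
        if i = j then pySet2 acc i.toNat j.toNat (1 - pyGet2 maps i j)
        else pySet2 acc i.toNat j.toNat (pyGet2 maps i j)) acc) n_maps
  else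
    (PySem.List.pyRange 0 3 1).foldl (fun acc i =>
      (PySem.List.pyRange 0 3 1).foldl (fun acc j =>
        if i = 2 - j then pySet2 acc i.toNat j.toNat (1 - pyGet2 maps i j)
        else pySet2 acc i.toNat j.toNat (pyGet2 maps i j)) acc) n_maps

-- ===== PORT B =====
-- row[:3] = take 3 and row[:i]/row[i+1:] = take i / drop (i+1) are exact for these
-- nonnegative indices; maps[i] and row[i] are exact under Pre_ (full 3x3 prefix).
def change_dig_alt (maps : List (List Int)) (n : Int) : List (List Int) :=
  let g := (PySem.List.pyRange 0 3 1).map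
    (fun i => ((PySem.List.pyGet? maps i).getD []).take 3)          -- [maps[i][:3] for i in range(3)]
  let g := if n ≠ 0 then g.reverse else g                           -- g.reverse()
  let out := (PySem.List.enumerate g).map (fun p =>
    let i := p.1; let row := p.2
    row.take i.toNat ++ [1 - (PySem.List.pyGet? row i).getD 0] ++ row.drop (i.toNat + 1))
  if n ≠ 0 then out.reverse else out                                -- out.reverse()

-- ===== PRECONDITION & SPEC =====
-- A indexes maps[i][j] for 0 ≤ i,j ≤ 2; it raises IndexError unless the grid has a full 3x3 prefix.
def Pre_change_dig (maps : List (List Int)) (n : Int) : Prop :=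
  3 ≤ maps.length ∧ ∀ row ∈ maps.take 3, 3 ≤ row.length
instance (maps : List (List Int)) (n : Int) : Decidable (Pre_change_dig maps n) := by
  unfold Pre_change_dig; infer_instance

def pvWitness_change_dig : List (List Int) × Int := ([[0,1,0],[1,1,0],[0,0,1]], 0)

def Spec_change_dig (maps : List (List Int)) (n : Int) (out : List (List Int)) : Prop := out = change_dig_alt maps n
instance (maps : List (List Int)) (n : Int) (out : List (List Int)) : Decidable (Spec_change_dig maps n out) := by unfold Spec_change_dig; infer_instance

-- ===== CLAIM =====
def Claim_equal_change_dig : Prop := ∀ (maps : List (List Int)) (n : Int), Dom_change_dig maps n → Pre_change_dig maps n → Spec_change_dig maps n (change_dig maps n)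

-- ===== LEMMAS AND PROOFS =====
theorem pyGet_one {α : Type} (x0 x1 : α) (xs : List α) :
    PySem.List.pyGet? (x0 :: x1 :: xs) 1 = some x1 := by
  rw [show (1:Int) = ((1:Nat):Int) by norm_num, PySem.List.pyGet?_natCast]; simp

theorem pyGet_two {α : Type} (x0 x1 x2 : α) (xs : List α) :
    PySem.List.pyGet? (x0 :: x1 :: x2 :: xs) 2 = some x2 := by
  rw [show (2:Int) = ((2:Nat):Int) by norm_num, PySem.List.pyGet?_natCast]; simp

-- ===== VERDICT =====
theorem change_dig_spec : Claim_equal_change_dig := by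
  intro maps n _ hpre
  obtain ⟨hlen, hrows⟩ := hpre
  match maps, hlen with
  | a :: b :: c :: rest, _ =>
    have ha : 3 ≤ a.length := hrows a (by simp [List.take])
    have hb : 3 ≤ b.length := hrows b (by simp [List.take])
    have hc : 3 ≤ c.length := hrows c (by simp [List.take])
    match a, ha with
    | a0 :: a1 :: a2 :: ar, _ =>
    match b, hb with
    | b0 :: b1 :: b2 :: br, _ =>
    match c, hc with
    | c0 :: c1 :: c2 :: cr, _ =>
      show Spec_change_dig _ _ _
      have hr : PySem.List.pyRange 0 3 1 = [0, 1, 2] := by decide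
      unfold Spec_change_dig change_dig change_dig_alt
      rw [hr]
      by_cases hn : n = 0 <;>
        simp [hn, pyGet2, pySet2, pyGet_one, pyGet_two, List.foldl,
              List.range, List.range.loop, PySem.List.enumerate_cons, PySem.List.enumerate_nil]
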